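-- pv_equiv track=rewrite | github.com/vineeth-krishna-1234/devLog | files/problems/solutions/2640.py | findPrefixScore
-- ===== SOURCE A (Python) =====
-- from typing import List
--
-- def findPrefixScore(nums: List[int]) -> List[int]:
--
--     if not len(nums):
--         return []
--
--     max_value = nums[0]
--     prefix_sum =[2*nums[0]]
--     for index in range(1,len(nums)):
--         max_value =max(max_value,nums[index])
--         prefix_sum.append(nums[index] + max_value+prefix_sum[index-1])
--     return prefix_sum
-- ===== SOURCE B (Python) =====
-- from typing import List
--
-- def findPrefixScore(nums: List[int]) -> List[int]:
--     # Phase 1: prefix sums of nums.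
--     pref = []
--     t = 0
--     for x in nums:
--         t += x
--         pref.append(t)
--     # Phase 2: run-length encode the running maximum as record segments
--     # (value, length): a new segment starts at each strict left-to-right maximum.
--     segs = []
--     cur = None  # (value, length) of the open segment
--     for x in nums:
--         if cur is None or x > cur[0]:
--             if cur is not None:
--                 segs.append(cur)
--             cur = (x, 1)
--         else:
--             cur = (cur[0], cur[1] + 1)
--     if cur is not None:
--         segs.append(cur)
--     # Phase 3: expand the segments into cumulative running-max sums by
--     # multiplication: inside a segment of value v the cumulative sum grows
--     # linearly, base + v*k.
--     msum = []
--     base = 0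
--     for v, L in segs:
--         msum.extend(base + v * k for k in range(1, L + 1))
--         base += v * L
--     # Phase 4: answer = elementwise sum of the two cumulative arrays.
--     return [p + m for p, m in zip(pref, msum)]
-- ===== Notes on version B (the rewrite author's own statement) =====
-- stated objective: alternative
-- what changed: Instead of A's single fused loop maintaining a running max and a running sum, B run-length-encodes the running maximum into record segments (value,length) and expands each segment's cumulative contribution by multiplication base+v*k, then adds elementwise to the prefix sums of nums.
import Mathlib
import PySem

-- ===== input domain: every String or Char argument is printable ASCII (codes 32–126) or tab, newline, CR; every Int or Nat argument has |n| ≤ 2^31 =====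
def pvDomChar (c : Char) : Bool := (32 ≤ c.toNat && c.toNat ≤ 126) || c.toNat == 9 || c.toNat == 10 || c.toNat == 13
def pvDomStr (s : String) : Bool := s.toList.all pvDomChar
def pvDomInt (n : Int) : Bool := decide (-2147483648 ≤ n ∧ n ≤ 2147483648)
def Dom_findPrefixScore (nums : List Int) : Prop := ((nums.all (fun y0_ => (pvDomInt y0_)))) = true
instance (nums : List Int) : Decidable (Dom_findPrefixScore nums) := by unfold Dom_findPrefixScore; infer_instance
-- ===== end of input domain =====

-- ===== PORT A =====
-- B replaces A's fused running-max/running-sum loop by a segment decomposition of the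
-- running maximum (value,length records expanded by multiplication); alternative algorithm, same cost.
-- Literal port of A: empty-input guard, then a fold keeping (max_value, prefix_sum);
-- prefix_sum[index-1] is the last element appended.
def findPrefixScore (nums : List Int) : List Int :=
  match nums with
  | [] => []
  | x :: rest =>
    (rest.foldl
      (fun (st : Int × List Int) y =>
        let m' := max st.1 y
        (m', st.2 ++ [y + m' + st.2.getLast!]))
      (x, [2 * x])).2

-- ===== PORT B =====
-- phase 1 of Source B: prefix sums of nums (append-in-loop → cons recursion on the same state)
def pvPrefLoop (t : Int) (xs : List Int) : List Int :=
  match xs with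
  | [] => []
  | x :: rest => (t + x) :: pvPrefLoop (t + x) rest

-- phase 2 of Source B: run-length encode the running maximum into record segments (value, length);
-- `cur` is the open segment (None before the first element), flushed at the end.
def pvSegLoop (cur : Option (Int × Int)) (xs : List Int) : List (Int × Int) :=
  match xs with
  | [] => (match cur with | none => [] | some c => [c])
  | x :: rest =>
    match cur with
    | none => pvSegLoop (some (x, 1)) rest
    | some (v, L) =>
      if x > v then (v, L) :: pvSegLoop (some (x, 1)) rest
      else pvSegLoop (some (v, L + 1)) rest

-- phase 3 of Source B: expand segments into cumulative running-max sums by multiplication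
def pvExpandLoop (base : Int) (segs : List (Int × Int)) : List Int :=
  match segs with
  | [] => []
  | (v, L) :: rest =>
    (PySem.List.pyRange 1 (L + 1) 1).map (fun k => base + v * k)
      ++ pvExpandLoop (base + v * L) rest

def findPrefixScore_alt (nums : List Int) : List Int :=
  -- phase 4 of Source B: elementwise sum of the two cumulative arrays (zip comprehension)
  List.zipWith (· + ·) (pvPrefLoop 0 nums) (pvExpandLoop 0 (pvSegLoop none nums))

-- ===== PRECONDITION & SPEC =====
def Spec_findPrefixScore (nums : List Int) (out : List Int) : Prop := out = findPrefixScore_alt nums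
instance (nums : List Int) (out : List Int) : Decidable (Spec_findPrefixScore nums out) := by unfold Spec_findPrefixScore; infer_instance

-- ===== CLAIM =====
def Claim_equal_findPrefixScore : Prop := ∀ (nums : List Int), Dom_findPrefixScore nums → Spec_findPrefixScore nums (findPrefixScore nums)

-- ===== LEMMAS AND PROOFS =====
-- reference for A: the elementwise conversion list nums[i] + runmax[i]
def pvConvLoop (m : Option Int) (xs : List Int) : List Int :=
  match xs with
  | [] => []
  | x :: rest =>
    let m' := match m with | none => x | some mv => max mv x
    (x + m') :: pvConvLoop (some m') rest

-- the running-maximum list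
def pvRunMax (m : Option Int) (xs : List Int) : List Int :=
  match xs with
  | [] => []
  | x :: rest =>
    let m' := match m with | none => x | some mv => max mv x
    m' :: pvRunMax (some m') rest

theorem pvGetLast!_append_single (acc : List Int) (s : Int) :
    (acc ++ [s]).getLast! = s := by
  induction acc with
  | nil => rfl
  | cons a t ih =>
    cases t with
    | nil => rfl
    | cons b u => simp [List.getLast!] at ih ⊢

theorem pvPrefLoop_congr (s t : Int) (cs : List Int) (h : s = t) :
    pvPrefLoop s cs = pvPrefLoop t cs := by rw [h]

-- A's fold produces the prefix sums of the conversion list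
theorem pvLoop_inv (rest : List Int) :
    ∀ (m s : Int) (acc : List Int),
    (rest.foldl
      (fun (st : Int × List Int) y =>
        let m' := max st.1 y
        (m', st.2 ++ [y + m' + st.2.getLast!]))
      (m, acc ++ [s])).2 = (acc ++ [s]) ++ pvPrefLoop s (pvConvLoop (some m) rest) := by
  induction rest with
  | nil => intro m s acc; simp [pvConvLoop, pvPrefLoop]
  | cons y t ih =>
    intro m s acc
    simp only [List.foldl_cons, pvConvLoop, pvPrefLoop]
    rw [pvGetLast!_append_single]
    have h2 : acc ++ [s] ++ [y + max m y + s] = (acc ++ [s]) ++ [y + max m y + s] := rfl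
    rw [h2, ih (max m y) (y + max m y + s) (acc ++ [s])]
    rw [pvPrefLoop_congr (s + (y + max m y)) (y + max m y + s) _ (by ring)]
    simp
    ring

-- conv = nums + runmax, elementwise
theorem pvConv_eq_zip (xs : List Int) : ∀ m,
    pvConvLoop m xs = List.zipWith (· + ·) xs (pvRunMax m xs) := by
  induction xs with
  | nil => intro m; rfl
  | cons x r ih => intro m; cases m <;> simp [pvConvLoop, pvRunMax, ih]

theorem pvRunMax_length (xs : List Int) : ∀ m, (pvRunMax m xs).length = xs.length := by
  induction xs with
  | nil => intro m; rfl
  | cons x r ih => intro m; cases m <;> simp [pvRunMax, ih]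

-- prefix sums distribute over elementwise addition
theorem pvPref_zip (a : List Int) : ∀ (b : List Int) (s t : Int), a.length = b.length →
    List.zipWith (· + ·) (pvPrefLoop s a) (pvPrefLoop t b)
      = pvPrefLoop (s + t) (List.zipWith (· + ·) a b) := by
  induction a with
  | nil => intro b s t h; rfl
  | cons x r ih =>
    intro b s t h
    cases b with
    | nil => simp at h
    | cons y u =>
      simp only [List.zipWith, pvPrefLoop]
      rw [ih u (s + x) (t + y) (by simpa using h)]
      have hb : s + x + (t + y) = s + t + (x + y) := by ring
      rw [hb]

-- core lemma: expanding the segment encoding yields the prefix sums of the running maxima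
theorem pvExpand_inv (xs : List Int) : ∀ (v L base : Int), 1 ≤ L →
    pvExpandLoop base (pvSegLoop (some (v, L)) xs)
      = (PySem.List.pyRange 1 (L + 1) 1).map (fun k => base + v * k)
        ++ pvPrefLoop (base + v * L) (pvRunMax (some v) xs) := by
  induction xs with
  | nil => intro v L base _; simp [pvSegLoop, pvExpandLoop, pvRunMax, pvPrefLoop]
  | cons x r ih =>
    intro v L base hL
    by_cases hx : x > v
    · simp only [pvSegLoop, if_pos hx, pvExpandLoop]
      rw [ih x 1 (base + v * L) (le_refl (1 : Int))]
      have hmax : max v x = x := max_eq_right (le_of_lt hx)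
      simp only [pvRunMax, hmax, pvPrefLoop]
      have hr : PySem.List.pyRange 1 (1 + 1) 1 = [1] := by
        rw [PySem.List.pyRange_one_cons (by norm_num)]
        rw [PySem.List.pyRange_one_eq_nil (by norm_num)]
      rw [hr]
      simp only [List.map_cons, List.map_nil, List.cons_append,
        List.nil_append]
      have hb : base + v * L + x * 1 = base + v * L + x := by ring
      rw [hb]
    · simp only [pvSegLoop, if_neg hx]
      rw [ih v (L + 1) base (by omega)]
      have hmax : max v x = v := max_eq_left (le_of_not_gt hx)
      simp only [pvRunMax, hmax, pvPrefLoop]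
      have hr : PySem.List.pyRange 1 (L + 1 + 1) 1
          = PySem.List.pyRange 1 (L + 1) 1 ++ [L + 1] := by
        exact PySem.List.pyRange_one_succ_right (by omega)
      rw [hr]
      simp only [List.map_append, List.map_cons, List.map_nil, List.append_assoc,
        List.cons_append, List.nil_append]
      have hb : base + v * (L + 1) = base + v * L + v := by ring
      rw [hb]

-- phases 2+3 of B compute the prefix sums of the running maxima
theorem pvExpand_eq (xs : List Int) :
    pvExpandLoop 0 (pvSegLoop none xs) = pvPrefLoop 0 (pvRunMax none xs) := by
  cases xs with
  | nil => rfl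
  | cons x r =>
    simp only [pvSegLoop, pvRunMax, pvPrefLoop]
    rw [pvExpand_inv r x 1 0 (le_refl (1 : Int))]
    have hr : PySem.List.pyRange 1 (1 + 1) 1 = [1] := by
      rw [PySem.List.pyRange_one_cons (by norm_num)]
      rw [PySem.List.pyRange_one_eq_nil (by norm_num)]
    rw [hr]
    simp only [List.map_cons, List.map_nil, List.cons_append, List.nil_append]
    have hb : (0 : Int) + x * 1 = 0 + x := by ring
    rw [hb]

-- ===== VERDICT =====
theorem findPrefixScore_spec : Claim_equal_findPrefixScore := by
  intro nums _
  unfold Spec_findPrefixScore findPrefixScore findPrefixScore_alt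
  rw [pvExpand_eq, pvPref_zip nums (pvRunMax none nums) 0 0 (by rw [pvRunMax_length])]
  rw [← pvConv_eq_zip]
  match nums with
  | [] => rfl
  | x :: rest =>
    simp only [pvConvLoop, pvPrefLoop]
    have h : ([] : List Int) ++ [2 * x] = [2 * x] := rfl
    rw [← h, pvLoop_inv rest x (2 * x) []]
    have e : (0 : Int) + 0 + (x + x) = 2 * x := by ring
    rw [e]
    simp
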